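-- pv_equiv track=rewrite | github.com/Theppasitlu/Python101 | HomeWorkHelp/4_loops.py | least_pn_having
-- ===== SOURCE A (Python) =====
-- def next_partition_number(p, posnums):
--     """
--     กำหนดให้ m คือขนาดของลิสต์ p
--     รับ p เป็นลิสต์มี p[0], p[1], ..., p[m-1]
--        เก็บ partition numbers ตัวที่ 0 ถึง m-1 ตามลำดับ
--     รับ posnums เป็นลิสต์เก็บ position numbers ตั้งแต่ตัวแรกไปเรื่อย ๆ
--        โดย posnums[-1] > m
--     คืน partition number ตัวที่ m (ขอเน้นว่า ไม่ต้องเพิ่มใน p)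
--     เช่น next_partition_number([1], [1,2,5,7,12]) คืน 1
--         next_partition_number([1,1,2,3,5,7], [1,2,5,7]) คืน 11
--     หมายเหตุ: ห้ามแก้ไขข้อมูลในลิสต์ p และ posnums โดยเด็ดขาด
--     """
--     #       p[6] = p[6-1] + p[6-2] - p[6-5] #!- p[6-7] + p[] + p[] - p[] - p[]
--                 #=   7    +    5   -   1  --> 11
--     m = len(p)
--     part = 0
--     i = 0
--     while m - posnums[i] >= 0:
--         if i%4 in [0, 1]:
--             part += p[m - posnums[i]]
--         else:
--             part -= p[m - posnums[i]]
--         if m - posnums[i] == 0: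
--             break
--         i += 1
--     return part
--
-- def least_pn_having(x):
--
--     Want = False
--     Data = [1]
--     k = 0
--     poslist = []
--     odd = 1
--     even = 1
--     po = 0
--     while not Want:
--         if k%2 == 1:
--             po += odd
--             poslist += [po]
--             odd += 1
--         else:
--             po += even
--             poslist += [po]
--             even += 2
--         Data += [next_partition_number(Data, poslist)]
--         j = 0
--         Temp = str(Data[k])
--         for ch in str(x):
--             for i in range(j, len(Temp)):
--                 if ch == Temp[i]:
--                     j = i+1
--                     break
--             else:
--                 break
--         else:
--             Want = True
--             return Temp
--         k += 1
-- ===== SOURCE B (Python) =====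
-- def _euler_coeff(i):
--     # coefficient of q^i in Euler's product prod_{m>=1}(1 - q^m):
--     # +1/-1 at generalized pentagonal i = j(3j-1)/2 or j(3j+1)/2, else 0
--     j = 1
--     while j * (3 * j - 1) // 2 <= i:
--         if i == j * (3 * j - 1) // 2 or i == j * (3 * j + 1) // 2:
--             return 1 if j % 2 == 0 else -1
--         j += 1
--     return 0
--
--
-- def least_pn_having(x):
--     # Power-series long division: p = 1 / E(q), where E is kept as a dense
--     # coefficient list extended by one entry per step, and each new partition
--     # number is a full convolution p[n] = -sum(E[i] * p[n-i]).
--     target = str(x)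
--     p = [1]
--     E = [1]
--     k = 0
--     while True:
--         s = str(p[k])
--         it = iter(s)
--         if all(c in it for c in target):
--             return s
--         n = len(p)
--         E.append(_euler_coeff(n))
--         p.append(-sum(E[i] * p[n - i] for i in range(1, n + 1)))
--         k += 1
-- ===== Notes on version B (the rewrite author's own statement) =====
-- stated objective: alternative
-- what changed: B computes the partition sequence by power-series long division p = 1/E(q): it materialises Euler's product prod(1-q^m) as a dense coefficient list (one coefficient per step from a standalone pentagonal membership test) and obtains each new term as a full convolution -sum(E[i]*p[n-i]) over ALL i, and tests the digit subsequence with a consuming-iterator scan, replacing A's sparse gather over an incrementally grown poslist with odd/even/po counters, the mod-four sign table and the nested for/else index scan.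
import Mathlib
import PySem

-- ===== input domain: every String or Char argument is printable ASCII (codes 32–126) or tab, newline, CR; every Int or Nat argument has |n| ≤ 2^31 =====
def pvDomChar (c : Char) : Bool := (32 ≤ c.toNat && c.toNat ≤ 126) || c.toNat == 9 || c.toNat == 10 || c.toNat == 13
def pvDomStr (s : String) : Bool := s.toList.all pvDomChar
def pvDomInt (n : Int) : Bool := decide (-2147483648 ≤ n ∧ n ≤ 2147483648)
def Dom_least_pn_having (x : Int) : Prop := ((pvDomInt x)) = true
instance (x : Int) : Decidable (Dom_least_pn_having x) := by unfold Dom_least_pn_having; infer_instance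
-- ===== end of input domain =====

-- B computes the partition sequence by power-series long division 1/E(q): a dense Euler
-- coefficient list (one coefficient per step from a standalone pentagonal membership test)
-- and each new term as a full convolution -sum(E[i]*p[n-i]), with a consuming-iterator
-- subsequence test; A grows a sparse poslist with odd/even/po counters and a mod-four sign scan.
-- Objective: alternative (no speed claim). Both loops search an unbounded sequence: for x
-- whose decimal string never matches (e.g. any negative x, whose '-' cannot occur in a digit
-- string) Python A loops forever; both ports carry the same fuel guard 100000 (returning ""
-- on exhaustion), so their equality is total.

-- ===== PORT A =====
-- inner `for i in range(j, len(Temp)): if ch == Temp[i]: j = i+1; break` (returns new j, none = no match)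
def pvFindIdxA (Temp : List Char) (ch : Char) : List Int → Option Int
  | [] => none
  | i :: rest =>
    if PySem.List.pyGet? Temp i = some ch then some (i + 1) else pvFindIdxA Temp ch rest

-- the `for ch in str(x): … else: Want = True` nest, carrying j
def pvSubChkA (Temp : List Char) : List Char → Int → Bool
  | [], _ => true
  | ch :: rest, j =>
    match pvFindIdxA Temp ch (PySem.List.pyRange j (PySem.List.len Temp) 1) with
    | some j' => pvSubChkA Temp rest j'
    | none => false

-- the while loop of next_partition_number; i increases and needs posnums[i], so
-- posnums.length + 1 fuel always suffices (fuel is only a totality guard)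
def pvNextPNGo (p posnums : List Int) (m : Int) : Nat → Int → Int → Int
  | 0, _, part => part
  | fuel + 1, i, part =>
    match PySem.List.pyGet? posnums i with
    | none => part  -- Python would raise IndexError here; unreachable from least_pn_having
    | some pos =>
      if m - pos ≥ 0 then
        let part' := if PySem.Int.mod i 4 = 0 ∨ PySem.Int.mod i 4 = 1
                     then part + PySem.List.pyGetD p (m - pos) 0
                     else part - PySem.List.pyGetD p (m - pos) 0
        if m - pos = 0 then part' else pvNextPNGo p posnums m fuel (i + 1) part'
      else part

def next_partition_number (p posnums : List Int) : Int :=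
  pvNextPNGo p posnums (PySem.List.len p) (posnums.length + 1) 0 0

-- the unbounded `while not Want` loop (fuel guard; both ports share the same budget)
def pvLpnAGo (xs : List Char) : Nat → List Int → Int → List Int → Int → Int → Int → String
  | 0, _, _, _, _, _, _ => ""
  | fuel + 1, Data, k, poslist, odd, even, po =>
    let st : Int × List Int × Int × Int :=
      if PySem.Int.mod k 2 = 1 then (po + odd, poslist ++ [po + odd], odd + 1, even)
      else (po + even, poslist ++ [po + even], odd, even + 2)
    let Data' := Data ++ [next_partition_number Data st.2.1]
    let v := PySem.List.pyGetD Data' k 0   -- Data[k]; k < len(Data) always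
    if pvSubChkA (PySem.Int.toChars v) xs 0 then PySem.Int.toStr v
    else pvLpnAGo xs fuel Data' (k + 1) st.2.1 st.2.2.1 st.2.2.2 st.1

def least_pn_having (x : Int) : String :=
  pvLpnAGo (PySem.Int.toChars x) 100000 [1] 0 [] 1 1 0

-- ===== PORT B =====
-- `c in it` on the iterator: consume until c is found, return the rest
def pvConsumeB (c : Char) : List Char → Option (List Char)
  | [] => none
  | d :: rest => if d = c then some rest else pvConsumeB c rest

-- `it = iter(s); all(c in it for c in target)`
def pvSubChkB : List Char → List Char → Bool
  | [], _ => true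
  | c :: cs, s =>
    match pvConsumeB c s with
    | some rest => pvSubChkB cs rest
    | none => false

-- the while loop of _euler_coeff; j only grows while j(3j-1)/2 ≤ i, so i.toNat+1 fuel suffices
def pvECGo (i : Int) : Nat → Int → Int
  | 0, _ => 0
  | fuel + 1, j =>
    if PySem.Int.floordiv (j * (3 * j - 1)) 2 ≤ i then
      if i = PySem.Int.floordiv (j * (3 * j - 1)) 2 ∨ i = PySem.Int.floordiv (j * (3 * j + 1)) 2 then
        (if PySem.Int.mod j 2 = 0 then 1 else -1)
      else pvECGo i fuel (j + 1)
    else 0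

def pvEulerCoeff (i : Int) : Int := pvECGo i (i.toNat + 1) 1

-- the `while True` loop: p, E and k; one convolution per step
-- (E[i] and p[n-i] read with pyGetD: every index 1..n is in range since len E = len p = n+1)
def pvLpnBGo (target : List Char) : Nat → List Int → List Int → Int → String
  | 0, _, _, _ => ""
  | fuel + 1, p, E, k =>
    let v := PySem.List.pyGetD p k 0     -- p[k]; k < len(p) always
    if pvSubChkB target (PySem.Int.toChars v) then PySem.Int.toStr v
    else
      let n := PySem.List.len p
      let E' := E ++ [pvEulerCoeff n]
      let s := (PySem.List.pyRange 1 (n + 1) 1).foldl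
        (fun acc i => acc + PySem.List.pyGetD E' i 0 * PySem.List.pyGetD p (n - i) 0) 0
      pvLpnBGo target fuel (p ++ [-s]) E' (k + 1)

def least_pn_having_alt (x : Int) : String :=
  pvLpnBGo (PySem.Int.toChars x) 100000 [1] [1] 0

-- ===== PRECONDITION & SPEC =====
def Spec_least_pn_having (x : Int) (out : String) : Prop := out = least_pn_having_alt x
instance (x : Int) (out : String) : Decidable (Spec_least_pn_having x out) := by unfold Spec_least_pn_having; infer_instance

-- ===== CLAIM (what is proved, stated in full; the proofs are below) =====
def Claim_equal_least_pn_having : Prop := ∀ (x : Int), Dom_least_pn_having x → Spec_least_pn_having x (least_pn_having x)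

-- ===== LEMMAS AND PROOFS =====

-- closed-form generalized pentagonal numbers
def pvG1 (j : Int) : Int := PySem.Int.floordiv (j * (3 * j - 1)) 2
def pvG2 (j : Int) : Int := PySem.Int.floordiv (j * (3 * j + 1)) 2
-- the t-th entry A appends to poslist (merged increasing pentagonal stream)
def pvGp (t : Nat) : Int := if t % 2 = 0 then pvG1 (t / 2 + 1) else pvG2 (t / 2 + 1)
-- A's po at entry of step k
def pvPoF (k : Nat) : Int := if k % 2 = 0 then pvG2 (k / 2) else pvG1 (k / 2 + 1)
-- B's E list after k outer steps
def pvEList (k : Nat) : List Int := (1 : Int) :: (List.range k).map (fun r : Nat => pvEulerCoeff ((r : Int) + 1))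

lemma pvG2_eq (j : Int) : pvG2 j = pvG1 j + j := by
  unfold pvG1 pvG2
  rw [PySem.Int.floordiv_eq_ediv_of_pos (by norm_num), PySem.Int.floordiv_eq_ediv_of_pos (by norm_num)]
  have h : j * (3 * j + 1) = j * (3 * j - 1) + j * 2 := by ring
  rw [h, Int.add_mul_ediv_right _ _ (by norm_num)]
lemma pvG1_succ (j : Int) : pvG1 (j + 1) = pvG2 j + (2 * j + 1) := by
  unfold pvG1 pvG2
  rw [PySem.Int.floordiv_eq_ediv_of_pos (by norm_num), PySem.Int.floordiv_eq_ediv_of_pos (by norm_num)]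
  have h : (j + 1) * (3 * (j + 1) - 1) = j * (3 * j + 1) + (2 * j + 1) * 2 := by
    ring
  rw [h, Int.add_mul_ediv_right _ _ (by norm_num)]
lemma pvG1_lb : ∀ t : Nat, 2 * (t : Int) + 1 ≤ pvG1 ((t : Int) + 1) := by
  intro t
  induction t with
  | zero => decide
  | succ s ih =>
    have h1 : pvG1 ((s : Int) + 1 + 1) = pvG1 ((s : Int) + 1) + ((s : Int) + 1) + (2 * s + 3) := by
      rw [pvG1_succ ((s : Int) + 1), pvG2_eq]; ring
    push_cast
    push_cast at ih
    omega

lemma pvGp_even (t : Nat) : pvGp (2 * t) = pvG1 ((t : Int) + 1) := by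
  unfold pvGp
  rw [if_pos (by omega)]
  norm_num
lemma pvGp_odd (t : Nat) : pvGp (2 * t + 1) = pvG2 ((t : Int) + 1) := by
  unfold pvGp
  rw [if_neg (by omega)]
  have h2 : ((2 * t + 1 : Nat) : Int) / 2 = (t : Int) := by omega
  rw [h2]

lemma pvGp_succ_lt (t : Nat) : pvGp t < pvGp (t + 1) := by
  rcases Nat.even_or_odd t with ⟨s, hs⟩ | ⟨s, hs⟩
  · subst hs
    rw [show s + s = 2 * s from by ring, show 2 * s + 1 = 2 * s + 1 from rfl,
        pvGp_even, pvGp_odd, pvG2_eq]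
    have : (0 : Int) < (s : Int) + 1 := by positivity
    omega
  · subst hs
    rw [show 2 * s + 1 + 1 = 2 * (s + 1) from by ring, pvGp_odd, pvGp_even,
        show ((s + 1 : Nat) : Int) + 1 = ((s : Int) + 1) + 1 from by push_cast; ring,
        pvG1_succ]
    have : (0 : Int) ≤ (s : Int) := by positivity
    omega

lemma pvGp_mono {a b : Nat} (h : a ≤ b) : pvGp a ≤ pvGp b := by
  induction b with
  | zero => simp_all
  | succ b ih =>
    rcases Nat.lt_or_ge a (b + 1) with hlt | hge
    · exact le_trans (ih (by omega)) (le_of_lt (pvGp_succ_lt b))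
    · have : a = b + 1 := by omega
      subst this; rfl

lemma pvGp_zero : pvGp 0 = 1 := by decide

lemma pvGp_ge (t : Nat) : (t : Int) + 1 ≤ pvGp t := by
  induction t with
  | zero => decide
  | succ s ih =>
    have := pvGp_succ_lt s
    push_cast
    omega

lemma pvGet_poslist (L m : Nat) : PySem.List.pyGet? ((List.range L).map pvGp) ((m : Nat) : Int)
    = if m < L then some (pvGp m) else none := by
  rw [PySem.List.pyGet?_natCast]
  by_cases h : m < L
  · simp [h]
  · rw [if_neg h, List.getElem?_eq_none (by simpa using by omega)]

-- accumulator shift for A's inner loop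
lemma pvNextPNGo_shift (p pl : List Int) (m : Int) :
    ∀ (f : Nat) (i a b : Int), pvNextPNGo p pl m f i (a + b) = a + pvNextPNGo p pl m f i b := by
  intro f
  induction f with
  | zero => intro i a b; rfl
  | succ f ih =>
    intro i a b
    simp only [pvNextPNGo]
    cases PySem.List.pyGet? pl i with
    | none => rfl
    | some pos =>
      simp only []
      by_cases hge : m - pos ≥ 0
      · rw [if_pos hge, if_pos hge]
        by_cases hc : PySem.Int.mod i 4 = 0 ∨ PySem.Int.mod i 4 = 1
        · simp only [if_pos hc]
          by_cases hz : m - pos = 0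
          · rw [if_pos hz, if_pos hz]; ring
          · rw [if_neg hz, if_neg hz,
                show a + b + PySem.List.pyGetD p (m - pos) 0
                   = a + (b + PySem.List.pyGetD p (m - pos) 0) from by ring, ih]
        · simp only [if_neg hc]
          by_cases hz : m - pos = 0
          · rw [if_pos hz, if_pos hz]; ring
          · rw [if_neg hz, if_neg hz,
                show a + b - PySem.List.pyGetD p (m - pos) 0
                   = a + (b - PySem.List.pyGetD p (m - pos) 0) from by ring, ih]
      · rw [if_neg hge, if_neg hge]

lemma pvG1_fd (j : Int) : PySem.Int.floordiv (j * (3 * j - 1)) 2 = pvG1 j := rfl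
lemma pvG2_fd (j : Int) : PySem.Int.floordiv (j * (3 * j + 1)) 2 = pvG2 j := rfl

lemma pvG1_add_one (j : Int) : pvG1 (j + 1) = pvG1 j + 3 * j + 1 := by
  rw [pvG1_succ, pvG2_eq]; ring

lemma pvG1_monoN {a b : Nat} (h : a ≤ b) : pvG1 (a : Int) ≤ pvG1 (b : Int) := by
  induction b with
  | zero => simp_all
  | succ b ih =>
    rcases Nat.lt_or_ge a (b + 1) with hlt | hge
    · refine le_trans (ih (by omega)) ?_
      have : ((b + 1 : Nat) : Int) = (b : Int) + 1 := by push_cast; ring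
      rw [this, pvG1_add_one]
      have : (0 : Int) ≤ (b : Int) := by positivity
      omega
    · have : a = b + 1 := by omega
      subst this; rfl

lemma pvG1_le_G2 (j : Int) (h : 0 ≤ j) : pvG1 j ≤ pvG2 j := by
  rw [pvG2_eq]; omega

lemma pvG2_lt_G1_succ (j : Int) (h : 0 ≤ j) : pvG2 j < pvG1 (j + 1) := by
  rw [pvG1_succ]; omega

-- `_euler_coeff` loop: hits a pentagonal pair → its sign
lemma pvECGo_hit (i : Int) : ∀ (f jd j0 : Nat), 1 ≤ j0 →
    (jd : Int) + (j0 : Int) + 1 ≤ (j0 : Int) + (f : Int) →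
    (i = pvG1 ((j0 : Int) + jd) ∨ i = pvG2 ((j0 : Int) + jd)) →
    (∀ j' : Nat, j0 ≤ j' → (j' : Int) < (j0 : Int) + jd → i ≠ pvG1 j' ∧ i ≠ pvG2 j') →
    pvECGo i f j0 = (if ((j0 + jd) % 2 = 0) then 1 else -1) := by
  intro f jd
  induction jd generalizing f with
  | zero =>
    intro j0 hj0 hfuel hij hprev
    obtain ⟨f', rfl⟩ : ∃ f', f = f' + 1 := ⟨f - 1, by push_cast at hfuel; omega⟩
    have hij' : i = pvG1 (j0 : Int) ∨ i = pvG2 (j0 : Int) := by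
      simpa using hij
    have hg : pvG1 (j0 : Int) ≤ i := by
      rcases hij' with h | h
      · exact h.ge
      · rw [h]; exact pvG1_le_G2 _ (by positivity)
    simp only [pvECGo, pvG1_fd, pvG2_fd]
    rw [if_pos hg, if_pos hij']
    have hm : PySem.Int.mod (j0 : Int) 2 = (j0 : Int) % 2 :=
      PySem.Int.mod_eq_emod_of_pos (by norm_num)
    by_cases hp : j0 % 2 = 0
    · rw [if_pos (by rw [hm]; omega), if_pos (by omega)]
    · rw [if_neg (by rw [hm]; omega), if_neg (by omega)]
  | succ jd ih =>
    intro j0 hj0 hfuel hij hprev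
    obtain ⟨f', rfl⟩ : ∃ f', f = f' + 1 := ⟨f - 1, by push_cast at hfuel; omega⟩
    have hcast : (j0 : Int) + ((jd + 1 : Nat) : Int) = ((j0 + 1 : Nat) : Int) + (jd : Int) := by
      push_cast; ring
    have hijbig : pvG1 ((j0 : Int) + ((jd + 1 : Nat) : Int)) ≤ i := by
      rcases hij with h | h
      · exact h.ge
      · rw [h]; exact pvG1_le_G2 _ (by positivity)
    have hmono : pvG1 (j0 : Int) ≤ pvG1 ((j0 : Int) + ((jd + 1 : Nat) : Int)) := by
      have := pvG1_monoN (show j0 ≤ j0 + (jd + 1) by omega)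
      rwa [show ((j0 + (jd + 1) : Nat) : Int) = (j0 : Int) + ((jd + 1 : Nat) : Int) from by push_cast; ring] at this
    have hg : pvG1 (j0 : Int) ≤ i := le_trans hmono hijbig
    have hnot : ¬ (i = pvG1 (j0 : Int) ∨ i = pvG2 (j0 : Int)) := by
      have := hprev j0 (le_refl _) (by push_cast; omega)
      tauto
    simp only [pvECGo, pvG1_fd, pvG2_fd]
    rw [if_pos hg, if_neg hnot]
    have hres := ih f' (j0 + 1) (by omega) (by push_cast; push_cast at hfuel; omega)
      (by rwa [← hcast]) ?_
    · rw [show ((j0 : Int) + 1) = ((j0 + 1 : Nat) : Int) from by push_cast; ring, hres]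
      congr 2
      omega
    · intro j' h1 h2
      exact hprev j' (by omega) (by push_cast; push_cast at h2; omega)

-- `_euler_coeff` loop: no pentagonal anywhere from j0 on → 0
lemma pvECGo_zero (i : Int) : ∀ (f : Nat) (j0 : Nat), 1 ≤ j0 →
    (∀ j' : Nat, j0 ≤ j' → i ≠ pvG1 j' ∧ i ≠ pvG2 j') →
    pvECGo i f j0 = 0 := by
  intro f
  induction f with
  | zero => intro j0 _ _; rfl
  | succ f ih =>
    intro j0 hj0 hall
    simp only [pvECGo, pvG1_fd, pvG2_fd]
    by_cases hg : pvG1 (j0 : Int) ≤ i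
    · rw [if_pos hg, if_neg (by have := hall j0 (le_refl _); tauto)]
      rw [show ((j0 : Int) + 1) = ((j0 + 1 : Nat) : Int) from by push_cast; ring]
      exact ih (j0 + 1) (by omega) (fun j' h => hall j' (by omega))
    · rw [if_neg hg]

-- everything strictly before pair s+1 in the pentagonal stream is < pvG1 (s+1)
lemma pvPrev_lt (s j' : Nat) (h1 : 1 ≤ j') (h2 : j' < s + 1) :
    pvG1 (j' : Int) < pvG1 ((s : Int) + 1) ∧ pvG2 (j' : Int) < pvG1 ((s : Int) + 1) := by
  have hchain : pvG2 (j' : Int) < pvG1 ((j' : Int) + 1) :=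
    pvG2_lt_G1_succ _ (by positivity)
  have hmono : pvG1 ((j' : Int) + 1) ≤ pvG1 ((s : Int) + 1) := by
    have := pvG1_monoN (show j' + 1 ≤ s + 1 by omega)
    rwa [show ((j' + 1 : Nat) : Int) = (j' : Int) + 1 from by push_cast; ring,
         show ((s + 1 : Nat) : Int) = (s : Int) + 1 from by push_cast; ring] at this
  have hle : pvG1 (j' : Int) ≤ pvG2 (j' : Int) := pvG1_le_G2 _ (by positivity)
  omega

lemma pvEulerCoeff_hit (t : Nat) :
    pvEulerCoeff (pvGp t) = (if ((t / 2 + 1) % 2 = 0) then 1 else -1) := by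
  unfold pvEulerCoeff
  have hnn : (0 : Int) ≤ pvGp t := le_trans (by positivity) (pvGp_ge t)
  have htn : ((pvGp t).toNat : Int) = pvGp t := Int.toNat_of_nonneg hnn
  rcases Nat.even_or_odd t with ⟨s, hs⟩ | ⟨s, hs⟩
  · have ht : t = 2 * s := by omega
    subst ht
    have hi : pvGp (2 * s) = pvG1 ((s : Int) + 1) := pvGp_even s
    have hfuel : (s : Int) + (1 : Nat) + 1 ≤ ((1 : Nat) : Int) + (((pvGp (2 * s)).toNat + 1 : Nat) : Int) := by
      have hlb := pvG1_lb s
      push_cast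
      rw [htn, hi]
      omega
    have hres := pvECGo_hit (pvGp (2 * s)) ((pvGp (2 * s)).toNat + 1) s 1 (le_refl _) hfuel
      (Or.inl (by rw [hi]; congr 1; push_cast; ring))
      (fun j' hj1 hj2 => by
        have := pvPrev_lt s j' hj1 (by push_cast at hj2; omega)
        rw [hi]; exact ⟨by omega, by omega⟩)
    rw [show (1 : Int) = ((1 : Nat) : Int) from rfl, hres,
        show (1 + s) % 2 = (2 * s / 2 + 1) % 2 from by omega]
    norm_num
  · have ht : t = 2 * s + 1 := by omega
    subst ht
    have hi : pvGp (2 * s + 1) = pvG2 ((s : Int) + 1) := pvGp_odd s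
    have hle : pvG1 ((s : Int) + 1) ≤ pvG2 ((s : Int) + 1) := pvG1_le_G2 _ (by positivity)
    have hfuel : (s : Int) + (1 : Nat) + 1 ≤ ((1 : Nat) : Int) + (((pvGp (2 * s + 1)).toNat + 1 : Nat) : Int) := by
      have hlb := pvG1_lb s
      push_cast
      rw [htn, hi]
      omega
    have hres := pvECGo_hit (pvGp (2 * s + 1)) ((pvGp (2 * s + 1)).toNat + 1) s 1 (le_refl _) hfuel
      (Or.inr (by rw [hi]; congr 1; push_cast; ring))
      (fun j' hj1 hj2 => by
        have := pvPrev_lt s j' hj1 (by push_cast at hj2; omega)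
        rw [hi]; exact ⟨by omega, by omega⟩)
    rw [show (1 : Int) = ((1 : Nat) : Int) from rfl, hres,
        show (1 + s) % 2 = ((2 * s + 1) / 2 + 1) % 2 from by omega]
    norm_num

lemma pvEulerCoeff_zero (i : Int) (_h1 : 1 ≤ i) (h : ∀ t : Nat, pvGp t ≠ i) :
    pvEulerCoeff i = 0 := by
  unfold pvEulerCoeff
  apply pvECGo_zero i _ 1 (le_refl _)
  intro j' hj'
  obtain ⟨s, rfl⟩ : ∃ s, j' = s + 1 := ⟨j' - 1, by omega⟩
  have hc : ((s + 1 : Nat) : Int) = (s : Int) + 1 := by push_cast; ring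
  constructor
  · have := h (2 * s)
    rw [pvGp_even] at this
    rw [hc]
    exact fun hx => this (by rw [hx])
  · have := h (2 * s + 1)
    rw [pvGp_odd] at this
    rw [hc]
    exact fun hx => this (by rw [hx])

-- A's inner loop returns 0 once the next pentagonal number exceeds n
lemma pvNext_stop (P : List Int) (L : Nat) (n : Int) (fA tN : Nat) (h : n < pvGp tN) :
    pvNextPNGo P ((List.range L).map pvGp) n fA ((tN : Nat) : Int) 0 = 0 := by
  cases fA with
  | zero => rfl
  | succ f =>
    simp only [pvNextPNGo, pvGet_poslist]
    by_cases hl : tN < L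
    · rw [if_pos hl]
      simp only []
      rw [if_neg (by omega)]
    · rw [if_neg hl]

-- dense convolution (B) = sparse poslist scan (A's inner loop)
lemma pvConv_eq (P E : List Int) (n : Int) (L : Nat)
    (hE : ∀ i : Nat, 1 ≤ i → (i : Int) ≤ n → PySem.List.pyGetD E ((i : Nat) : Int) 0 = pvEulerCoeff i)
    (hL : ∀ t : Nat, pvGp t ≤ n → t < L) :
    ∀ (fuelI iN tN : Nat) (acc : Int) (fA : Nat),
      1 ≤ iN → n + 1 ≤ (iN : Int) + (fuelI : Int) → n + 1 ≤ (tN : Int) + (fA : Int) →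
      (iN : Int) ≤ pvGp tN → (∀ t' : Nat, t' < tN → pvGp t' < (iN : Int)) →
      (PySem.List.pyRange ((iN : Nat) : Int) (n + 1) 1).foldl
          (fun acc i => acc + PySem.List.pyGetD E i 0 * PySem.List.pyGetD P (n - i) 0) acc
        = acc - pvNextPNGo P ((List.range L).map pvGp) n fA ((tN : Nat) : Int) 0 := by
  intro fuelI
  induction fuelI with
  | zero =>
    intro iN tN acc fA h1 hfi hfa hit hprev
    have hgt : n < pvGp tN := lt_of_lt_of_le (by push_cast at hfi; omega) hit
    rw [PySem.List.pyRange_one_eq_nil (by push_cast at hfi; omega), pvNext_stop P L n fA tN hgt]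
    simp
  | succ fuelI ih =>
    intro iN tN acc fA h1 hfi hfa hit hprev
    by_cases hin : (iN : Int) ≤ n
    · rw [PySem.List.pyRange_one_cons (by omega), List.foldl_cons]
      rw [hE iN h1 hin]
      rcases lt_or_eq_of_le hit with hlt | heq
      · -- iN is not pentagonal: zero coefficient, A side unchanged
        have hz : pvEulerCoeff ((iN : Nat) : Int) = 0 := by
          apply pvEulerCoeff_zero _ (by exact_mod_cast h1)
          intro t
          rcases Nat.lt_or_ge t tN with h | h
          · exact ne_of_lt (hprev t h)
          · exact ne_of_gt (lt_of_lt_of_le hlt (pvGp_mono h))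
        rw [hz, zero_mul, add_zero,
            show ((iN : Nat) : Int) + 1 = ((iN + 1 : Nat) : Int) from by push_cast; ring]
        exact ih (iN + 1) tN acc fA (by omega) (by push_cast; push_cast at hfi; omega) hfa
          (by push_cast; omega) (fun t' ht' => by have := hprev t' ht'; push_cast; omega)
      · -- iN = pvGp tN: one sparse step of A
        obtain ⟨fA', rfl⟩ : ∃ f', fA = f' + 1 := by
          refine ⟨fA - 1, ?_⟩
          have := pvGp_ge tN
          omega
        have htL : tN < L := hL tN (by omega)
        simp only [pvNextPNGo, pvGet_poslist, if_pos htL]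
        rw [if_pos (by omega : n - pvGp tN ≥ 0)]
        set X := PySem.List.pyGetD P (n - pvGp tN) 0 with hX
        rw [show n - ((iN : Nat) : Int) = n - pvGp tN from by rw [heq]]
        have hm4 : PySem.Int.mod ((tN : Nat) : Int) 4 = ((tN : Nat) : Int) % 4 :=
          PySem.Int.mod_eq_emod_of_pos (by norm_num)
        have hc : pvEulerCoeff ((iN : Nat) : Int)
            = (if ((tN / 2 + 1) % 2 = 0) then 1 else -1) := by
          rw [show ((iN : Nat) : Int) = pvGp tN from heq]
          exact pvEulerCoeff_hit tN
        have hXc : acc + pvEulerCoeff ((iN : Nat) : Int) * X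
            = acc - (if PySem.Int.mod ((tN : Nat) : Int) 4 = 0 ∨ PySem.Int.mod ((tN : Nat) : Int) 4 = 1
                     then 0 + X else 0 - X) := by
          rw [hc]
          by_cases hp : tN % 4 < 2
          · rw [if_neg (by omega : ¬ (tN / 2 + 1) % 2 = 0), if_pos (by rw [hm4]; omega)]
            ring
          · rw [if_pos (by omega : (tN / 2 + 1) % 2 = 0), if_neg (by rw [hm4]; omega)]
            ring
        by_cases hend : n - pvGp tN = 0
        · rw [if_pos hend]
          rw [PySem.List.pyRange_one_eq_nil (by omega : n + 1 ≤ ((iN : Nat) : Int) + 1)]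
          simpa using hXc
        · rw [if_neg hend]
          rw [show ((tN : Nat) : Int) + 1 = ((tN + 1 : Nat) : Int) from by push_cast; ring]
          have hshift := pvNextPNGo_shift P ((List.range L).map pvGp) n fA' ((tN + 1 : Nat) : Int)
            (if PySem.Int.mod ((tN : Nat) : Int) 4 = 0 ∨ PySem.Int.mod ((tN : Nat) : Int) 4 = 1
             then 0 + X else 0 - X) 0
          rw [show (if PySem.Int.mod ((tN : Nat) : Int) 4 = 0 ∨ PySem.Int.mod ((tN : Nat) : Int) 4 = 1
                    then 0 + X else 0 - X) + 0
                = (if PySem.Int.mod ((tN : Nat) : Int) 4 = 0 ∨ PySem.Int.mod ((tN : Nat) : Int) 4 = 1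
                   then 0 + X else 0 - X) from by ring] at hshift
          rw [hshift,
              show ((iN : Nat) : Int) + 1 = ((iN + 1 : Nat) : Int) from by push_cast; ring]
          have hrec := ih (iN + 1) (tN + 1) (acc + pvEulerCoeff ((iN : Nat) : Int) * X) fA'
            (by omega) (by push_cast; push_cast at hfi; omega)
            (by push_cast; push_cast at hfa; omega)
            (by
              have := pvGp_succ_lt tN
              push_cast
              omega)
            (fun t' ht' => by
              rcases Nat.lt_or_ge t' tN with h | h
              · have := hprev t' h; push_cast; omega
              · have ht'' : t' = tN := by omega
                subst ht''
                push_cast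
                omega)
          rw [hrec]
          have := hXc
          linarith
    · have hgt : n < pvGp tN := lt_of_lt_of_le (by omega) hit
      rw [PySem.List.pyRange_one_eq_nil (by omega), pvNext_stop P L n fA tN hgt]
      simp

-- the value B appends is exactly A's next_partition_number
lemma pvNew_eq (P E' : List Int) (kN : Nat) (h : P.length = kN + 1)
    (hE : ∀ i : Nat, 1 ≤ i → (i : Int) ≤ PySem.List.len P →
        PySem.List.pyGetD E' ((i : Nat) : Int) 0 = pvEulerCoeff i) :
    -((PySem.List.pyRange 1 (PySem.List.len P + 1) 1).foldl
        (fun acc i => acc + PySem.List.pyGetD E' i 0 * PySem.List.pyGetD P (PySem.List.len P - i) 0) 0)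
      = next_partition_number P ((List.range (kN + 1)).map pvGp) := by
  have hlen : PySem.List.len P = ((kN + 1 : Nat) : Int) := by
    rw [PySem.List.len_eq, h]
  have hL : ∀ t : Nat, pvGp t ≤ PySem.List.len P → t < kN + 1 := by
    intro t ht
    have := pvGp_ge t
    rw [hlen] at ht
    push_cast at ht
    omega
  have hcv := pvConv_eq P E' (PySem.List.len P) (kN + 1) hE hL (kN + 1) 1 0 0 (kN + 2)
    (le_refl _) (by rw [hlen]; push_cast; omega) (by rw [hlen]; push_cast; omega)
    (by rw [pvGp_zero]; norm_num) (by omega)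
  unfold next_partition_number
  rw [List.length_map, List.length_range]
  rw [show ((1 : Nat) : Int) = (1 : Int) from rfl, show ((0 : Nat) : Int) = (0 : Int) from rfl] at hcv
  rw [hcv]
  ring

lemma pvEList_get (k i : Nat) (h1 : 1 ≤ i) (h2 : i ≤ k) :
    PySem.List.pyGetD (pvEList k) ((i : Nat) : Int) 0 = pvEulerCoeff i := by
  obtain ⟨m, rfl⟩ : ∃ m, i = m + 1 := ⟨i - 1, by omega⟩
  rw [PySem.List.pyGetD_natCast]
  unfold pvEList
  rw [List.getD_cons_succ, List.getD_eq_getElem?_getD, List.getElem?_map,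
      List.getElem?_range (by omega : m < k)]
  simp

lemma pvEList_succ (k : Nat) :
    pvEList k ++ [pvEulerCoeff ((k : Int) + 1)] = pvEList (k + 1) := by
  unfold pvEList
  rw [List.range_succ, List.map_append]
  simp

-- subsequence machinery: A's indexed scan = B's consuming iterator
lemma pvFind_consume (Temp : List Char) (ch : Char) :
    ∀ d jN, Temp.length - jN ≤ d →
      (pvConsumeB ch (Temp.drop jN) = none →
        pvFindIdxA Temp ch (PySem.List.pyRange (jN : Int) (PySem.List.len Temp) 1) = none) ∧
      (∀ rest, pvConsumeB ch (Temp.drop jN) = some rest →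
        ∃ mN : Nat, pvFindIdxA Temp ch (PySem.List.pyRange (jN : Int) (PySem.List.len Temp) 1)
            = some ((mN : Nat) : Int) ∧ Temp.drop mN = rest) := by
  intro d
  induction d with
  | zero =>
    intro jN h
    have hge : Temp.length ≤ jN := by omega
    have hdrop : Temp.drop jN = [] := List.drop_eq_nil_of_le hge
    have hrange : PySem.List.pyRange (jN : Int) (PySem.List.len Temp) 1 = [] := by
      apply PySem.List.pyRange_one_eq_nil
      simp [PySem.List.len_eq]; exact_mod_cast hge
    rw [hdrop, hrange]
    exact ⟨fun _ => rfl, fun rest hr => by simp [pvConsumeB] at hr⟩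
  | succ d ih =>
    intro jN h
    by_cases hlt : jN < Temp.length
    · have hdrop : Temp.drop jN = Temp[jN] :: Temp.drop (jN + 1) := by
        rw [List.drop_eq_getElem_cons hlt]
      have hrange : PySem.List.pyRange (jN : Int) (PySem.List.len Temp) 1
          = (jN : Int) :: PySem.List.pyRange ((jN : Int) + 1) (PySem.List.len Temp) 1 := by
        apply PySem.List.pyRange_one_cons
        simp [PySem.List.len_eq]; exact_mod_cast hlt
      have hget : PySem.List.pyGet? Temp (jN : Int) = some Temp[jN] := by
        simp [PySem.List.pyGet?_natCast, List.getElem?_eq_getElem hlt]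
      rw [hdrop, hrange]
      by_cases heq : Temp[jN] = ch
      · constructor
        · intro hc; simp [pvConsumeB, heq] at hc
        · intro rest hr
          simp only [pvConsumeB, if_pos heq] at hr
          refine ⟨jN + 1, ?_, ?_⟩
          · simp only [pvFindIdxA, hget]
            rw [if_pos (by rw [heq])]
            norm_cast
          · exact Option.some.inj hr
      · have ihs := ih (jN + 1) (by omega)
        have hcast : ((jN : Int) + 1) = ((jN + 1 : Nat) : Int) := by push_cast; ring
        constructor
        · intro hc
          simp only [pvConsumeB, if_neg heq] at hc
          simp only [pvFindIdxA, hget]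
          rw [if_neg (by simp [heq]), hcast]
          exact ihs.1 hc
        · intro rest hr
          simp only [pvConsumeB, if_neg heq] at hr
          obtain ⟨mN, h1, h2⟩ := ihs.2 rest hr
          refine ⟨mN, ?_, h2⟩
          simp only [pvFindIdxA, hget]
          rw [if_neg (by simp [heq]), hcast]
          exact h1
    · have hge : Temp.length ≤ jN := by omega
      have hdrop : Temp.drop jN = [] := List.drop_eq_nil_of_le hge
      have hrange : PySem.List.pyRange (jN : Int) (PySem.List.len Temp) 1 = [] := by
        apply PySem.List.pyRange_one_eq_nil
        simp [PySem.List.len_eq]; exact_mod_cast hge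
      rw [hdrop, hrange]
      exact ⟨fun _ => rfl, fun rest hr => by simp [pvConsumeB] at hr⟩

lemma pvSub_eq (Temp : List Char) : ∀ (xs : List Char) (jN : Nat),
    pvSubChkA Temp xs ((jN : Nat) : Int) = pvSubChkB xs (Temp.drop jN) := by
  intro xs
  induction xs with
  | nil => intro jN; rfl
  | cons ch rest ih =>
    intro jN
    have hf := pvFind_consume Temp ch (Temp.length - jN) jN (le_refl _)
    simp only [pvSubChkA, pvSubChkB]
    cases hc : pvConsumeB ch (Temp.drop jN) with
    | none => rw [hf.1 hc]
    | some r =>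
      obtain ⟨mN, h1, h2⟩ := hf.2 r hc
      rw [h1]
      simp only []
      rw [ih mN, h2]

lemma pvSub_eq0 (Temp xs : List Char) : pvSubChkA Temp xs 0 = pvSubChkB xs Temp := by
  simpa using pvSub_eq Temp xs 0

lemma pvPoF_even (t : Nat) : pvPoF (2 * t) = pvG2 (t : Int) := by
  unfold pvPoF
  rw [if_pos (by omega), show ((2 * t : Nat) : Int) / 2 = (t : Int) from by omega]
lemma pvPoF_odd (t : Nat) : pvPoF (2 * t + 1) = pvG1 ((t : Int) + 1) := by
  unfold pvPoF
  rw [if_neg (by omega), show ((2 * t + 1 : Nat) : Int) / 2 = (t : Int) from by omega]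

lemma pvGetD_append (P : List Int) (w : Int) (kN : Nat) (h : kN < P.length) :
    PySem.List.pyGetD (P ++ [w]) ((kN : Nat) : Int) 0 = PySem.List.pyGetD P ((kN : Nat) : Int) 0 := by
  rw [PySem.List.pyGetD_natCast, PySem.List.pyGetD_natCast]
  simp [List.getD, List.getElem?_append_left h]

-- the outer loops agree step for step
lemma pvOuter_eq (xs : List Char) : ∀ (fuel kN : Nat) (P : List Int), P.length = kN + 1 →
    pvLpnAGo xs fuel P (kN : Int) ((List.range kN).map pvGp)
        (1 + ((kN / 2 : Nat) : Int)) (1 + 2 * (((kN + 1) / 2 : Nat) : Int)) (pvPoF kN)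
      = pvLpnBGo xs fuel P (pvEList kN) (kN : Int) := by
  intro fuel
  induction fuel with
  | zero => intro kN P h; rfl
  | succ fuel ih =>
    intro kN P h
    simp only [pvLpnAGo, pvLpnBGo]
    have hEl : pvEList kN ++ [pvEulerCoeff (PySem.List.len P)] = pvEList (kN + 1) := by
      rw [PySem.List.len_eq, h, show ((kN + 1 : Nat) : Int) = (kN : Int) + 1 from by push_cast; ring]
      exact pvEList_succ kN
    have hEget : ∀ i : Nat, 1 ≤ i → (i : Int) ≤ PySem.List.len P →
        PySem.List.pyGetD (pvEList (kN + 1)) ((i : Nat) : Int) 0 = pvEulerCoeff i := by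
      intro i h1 hle
      refine pvEList_get (kN + 1) i h1 ?_
      rw [PySem.List.len_eq, h] at hle
      exact_mod_cast hle
    have hnew := pvNew_eq P (pvEList (kN + 1)) kN h hEget
    have hposl : ∀ w : Int, w = pvGp kN →
        ((List.range kN).map pvGp) ++ [w] = (List.range (kN + 1)).map pvGp := by
      intro w hw
      rw [hw, List.range_succ, List.map_append, List.map_singleton]
    rcases Nat.even_or_odd kN with ⟨t, ht⟩ | ⟨t, ht⟩
    · -- kN = 2t : the `else` (even) branch fires
      have h2 : kN = 2 * t := by omega
      subst h2
      have hm2 : PySem.Int.mod ((2 * t : Nat) : Int) 2 = ((2 * t : Nat) : Int) % 2 :=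
        PySem.Int.mod_eq_emod_of_pos (by norm_num)
      rw [if_neg (show ¬ (PySem.Int.mod ((2 * t : Nat) : Int) 2 = 1) from by rw [hm2]; omega)]
      have hw : pvPoF (2 * t) + (1 + 2 * ((((2 * t + 1) / 2 : Nat)) : Int)) = pvGp (2 * t) := by
        rw [pvPoF_even, show (((2 * t + 1) / 2 : Nat) : Int) = (t : Int) from by omega,
            pvGp_even, pvG1_succ]
        ring
      rw [hposl _ hw, hEl, hnew, pvGetD_append P _ (2 * t) (by omega)]
      rw [pvSub_eq0]
      by_cases hfound : (pvSubChkB xs (PySem.Int.toChars (PySem.List.pyGetD P ((2 * t : Nat) : Int) 0)) = true)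
      · rw [if_pos hfound, if_pos hfound]
      · rw [if_neg hfound, if_neg hfound]
        have hrec := ih (2 * t + 1) (P ++ [next_partition_number P ((List.range (2 * t + 1)).map pvGp)])
          (by simp [h])
        rw [show ((2 * t : Nat) : Int) + 1 = ((2 * t + 1 : Nat) : Int) from by push_cast; ring]
        rw [show pvPoF (2 * t) + (1 + 2 * ((((2 * t + 1) / 2 : Nat)) : Int)) = pvPoF (2 * t + 1) from by
          rw [hw, pvGp_even, pvPoF_odd]]
        rw [show (1 + ((((2 * t) / 2 : Nat)) : Int)) = (1 + ((((2 * t + 1) / 2 : Nat)) : Int)) from by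
          rw [show ((((2 * t) / 2 : Nat)) : Int) = (t : Int) from by omega,
              show ((((2 * t + 1) / 2 : Nat)) : Int) = (t : Int) from by omega]]
        rw [show (1 + 2 * ((((2 * t + 1) / 2 : Nat)) : Int)) + 2 = (1 + 2 * ((((2 * t + 2) / 2 : Nat)) : Int)) from by
          rw [show ((((2 * t + 1) / 2 : Nat)) : Int) = (t : Int) from by omega,
              show ((((2 * t + 2) / 2 : Nat)) : Int) = ((t : Int) + 1) from by omega]
          ring]
        exact hrec
    · -- kN = 2t + 1 : the `then` (odd) branch fires
      subst ht
      have hm2 : PySem.Int.mod ((2 * t + 1 : Nat) : Int) 2 = ((2 * t + 1 : Nat) : Int) % 2 :=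
        PySem.Int.mod_eq_emod_of_pos (by norm_num)
      rw [if_pos (show PySem.Int.mod ((2 * t + 1 : Nat) : Int) 2 = 1 from by rw [hm2]; omega)]
      have hw : pvPoF (2 * t + 1) + (1 + ((((2 * t + 1) / 2 : Nat)) : Int)) = pvGp (2 * t + 1) := by
        rw [pvPoF_odd, show (((2 * t + 1) / 2 : Nat) : Int) = (t : Int) from by omega,
            pvGp_odd, pvG2_eq]
        ring
      rw [hposl _ hw, hEl, hnew, pvGetD_append P _ (2 * t + 1) (by omega)]
      rw [pvSub_eq0]
      by_cases hfound : (pvSubChkB xs (PySem.Int.toChars (PySem.List.pyGetD P ((2 * t + 1 : Nat) : Int) 0)) = true)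
      · rw [if_pos hfound, if_pos hfound]
      · rw [if_neg hfound, if_neg hfound]
        have hrec := ih (2 * t + 2) (P ++ [next_partition_number P ((List.range (2 * t + 2)).map pvGp)])
          (by simp [h])
        rw [show ((2 * t + 1 : Nat) : Int) + 1 = ((2 * t + 2 : Nat) : Int) from by push_cast; ring]
        rw [show pvPoF (2 * t + 1) + (1 + ((((2 * t + 1) / 2 : Nat)) : Int)) = pvPoF (2 * t + 2) from by
          rw [hw, pvGp_odd, show 2 * t + 2 = 2 * (t + 1) from by ring, pvPoF_even,
              show ((t + 1 : Nat) : Int) = ((t : Int) + 1) from by push_cast; ring]]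
        rw [show (1 + ((((2 * t + 1) / 2 : Nat)) : Int)) + 1 = (1 + ((((2 * t + 2) / 2 : Nat)) : Int)) from by
          rw [show ((((2 * t + 1) / 2 : Nat)) : Int) = (t : Int) from by omega,
              show ((((2 * t + 2) / 2 : Nat)) : Int) = ((t : Int) + 1) from by omega]
          ring]
        rw [show (1 + 2 * ((((2 * t + 2) / 2 : Nat)) : Int)) = (1 + 2 * ((((2 * t + 3) / 2 : Nat)) : Int)) from by
          rw [show ((((2 * t + 2) / 2 : Nat)) : Int) = ((t : Int) + 1) from by omega,
              show ((((2 * t + 3) / 2 : Nat)) : Int) = ((t : Int) + 1) from by omega]]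
        exact hrec

-- ===== VERDICT (by name: the statement is the Claim_ definition above) =====
theorem least_pn_having_spec : Claim_equal_least_pn_having := by
  intro x _
  unfold Spec_least_pn_having least_pn_having least_pn_having_alt
  have h0 : pvPoF 0 = 0 := by decide
  have h := pvOuter_eq (PySem.Int.toChars x) 100000 0 [1] rfl
  rw [h0] at h
  simpa [pvEList] using h
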